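-- pv_equiv track=rewrite | github.com/sammyLOMI22/database-guru | src/core/multi_db_handler.py | parse_multi_database_sql
-- ===== SOURCE A (Python) =====
-- from typing import List, Dict, Any, Optional
--
-- def parse_multi_database_sql(llm_output: str) -> List[Dict[str, Any]]:
--     """
--     Parse LLM output that may contain multiple SQL queries for different databases
--
--     Expected format:
--     DATABASE: database_name
--     SELECT ...;
--
--     DATABASE: another_database
--     SELECT ...;
--
--     Args:
--         llm_output: Raw output from LLM
--
--     Returns:
--         List of dicts with 'database_name' and 'sql' keys
--     """
--     queries = []
--     current_db = None
--     current_sql_lines = []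
--
--     for line in llm_output.split("\n"):
--         line = line.strip()
--
--         # Check for database marker
--         if line.upper().startswith("DATABASE:"):
--             # Save previous query if exists
--             if current_db and current_sql_lines:
--                 queries.append(
--                     {
--                         "database_name": current_db,
--                         "sql": "\n".join(current_sql_lines).strip(),
--                     }
--                 )
--                 current_sql_lines = []
--
--             # Extract new database name
--             current_db = line.split(":", 1)[1].strip()
--
--         elif line and current_db:
--             # Collect SQL lines
--             current_sql_lines.append(line)
--
--     # Save last query
--     if current_db and current_sql_lines:
--         queries.append(
--             {"database_name": current_db, "sql": "\n".join(current_sql_lines).strip()}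
--         )
--
--     # If no database markers found, treat entire output as single query
--     if not queries and llm_output.strip():
--         queries.append({"database_name": None, "sql": llm_output.strip()})
--
--     return queries
-- ===== SOURCE B (Python) =====
-- def _segments(llm_output):
--     """First pass: cut the text into (database_name, sql_lines) segments."""
--     segments = []
--     for raw in llm_output.split("\n"):
--         line = raw.strip()
--         if line.upper().startswith("DATABASE:"):
--             segments.append((line.split(":", 1)[1].strip(), []))
--         elif line and segments:
--             segments[-1][1].append(line)
--     return segments
--
--
-- def parse_multi_database_sql(llm_output):
--     queries = [
--         {"database_name": name, "sql": "\n".join(lines).strip()}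
--         for name, lines in _segments(llm_output)
--         if name and lines
--     ]
--     if not queries and llm_output.strip():
--         queries.append({"database_name": None, "sql": llm_output.strip()})
--     return queries
-- ===== Notes on version B (the rewrite author's own statement) =====
-- stated objective: simpler
-- what changed: Replaces A's single-pass accumulator with duplicated flush logic by a two-pass decomposition: first cut the text into (name, lines) segments, then a comprehension maps/filters segments to query dicts, with the same fallback.
import Mathlib
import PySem

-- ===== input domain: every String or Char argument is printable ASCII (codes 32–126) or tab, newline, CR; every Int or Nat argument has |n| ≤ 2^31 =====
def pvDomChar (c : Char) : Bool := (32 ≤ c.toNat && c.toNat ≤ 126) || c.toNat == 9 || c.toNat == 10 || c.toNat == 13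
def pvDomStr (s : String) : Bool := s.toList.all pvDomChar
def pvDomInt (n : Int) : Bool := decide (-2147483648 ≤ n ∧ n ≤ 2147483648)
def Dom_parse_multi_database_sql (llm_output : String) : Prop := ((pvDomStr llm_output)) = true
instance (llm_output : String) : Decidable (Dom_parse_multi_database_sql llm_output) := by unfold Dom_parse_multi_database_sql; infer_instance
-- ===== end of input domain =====

-- B replaces A's one-pass accumulator (with its duplicated flush code) by a two-pass
-- decomposition: segment the lines, then map/filter segments to query dicts; simpler, same cost.

-- ===== PORT A =====
-- truthiness of current_db (None or "" are falsy)
def pvTruthyDb (o : Option String) : Bool :=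
  match o with
  | some s => decide (s ≠ "")
  | none => false

-- the dict {"database_name": db, "sql": sql} as an association list
def pvMkQuery (db : Option String) (sql : String) : List (String × Option String) :=
  [("database_name", db), ("sql", some sql)]

-- line.split(":", 1)[1].strip(); the index is in range whenever the marker test succeeded,
-- so the .getD defaults are unreachable there
def pvMarkerName (line : String) : String :=
  PySem.Str.strip ((PySem.List.pyGet? ((PySem.Str.splitMax? line ":" 1).getD []) 1).getD "")

-- one iteration of A's loop over state (queries, current_db, current_sql_lines)
def pvAStep (st : List (List (String × Option String)) × Option String × List String)
    (rawLine : String) : List (List (String × Option String)) × Option String × List String :=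
  let queries := st.1
  let current_db := st.2.1
  let current_sql_lines := st.2.2
  let line := PySem.Str.strip rawLine
  if PySem.Str.startswith (PySem.Str.upper line) "DATABASE:" then
    if pvTruthyDb current_db && !current_sql_lines.isEmpty then
      (queries ++ [pvMkQuery current_db (PySem.Str.strip (PySem.Str.join "\n" current_sql_lines))],
       some (pvMarkerName line), [])
    else (queries, some (pvMarkerName line), current_sql_lines)
  else if decide (line ≠ "") && pvTruthyDb current_db then
    (queries, current_db, current_sql_lines ++ [line])
  else
    (queries, current_db, current_sql_lines)

def parse_multi_database_sql (llm_output : String) : List (List (String × Option String)) :=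
  let st := (((PySem.Str.split? llm_output "\n").getD [])).foldl pvAStep ([], none, [])
  let queries :=
    if pvTruthyDb st.2.1 && !st.2.2.isEmpty then
      st.1 ++ [pvMkQuery st.2.1 (PySem.Str.strip (PySem.Str.join "\n" st.2.2))]
    else st.1
  if queries.isEmpty && decide (PySem.Str.strip llm_output ≠ "") then
    [[("database_name", none), ("sql", some (PySem.Str.strip llm_output))]]
  else queries

-- ===== PORT B =====
-- one iteration of _segments' loop: open a segment at a marker, else append to the last one
def pvBStep (segs : List (String × List String)) (rawLine : String) : List (String × List String) :=
  let line := PySem.Str.strip rawLine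
  if PySem.Str.startswith (PySem.Str.upper line) "DATABASE:" then
    segs ++ [(pvMarkerName line, [])]
  else if decide (line ≠ "") && !segs.isEmpty then
    segs.dropLast ++ [((segs.getLast?.getD ("", [])).1, (segs.getLast?.getD ("", [])).2 ++ [line])]
  else segs

def pvSegments (llm_output : String) : List (String × List String) :=
  (((PySem.Str.split? llm_output "\n").getD [])).foldl pvBStep []

-- one clause of the comprehension: keep a segment iff name truthy and lines non-empty
def pvSegOut (seg : String × List String) : Option (List (String × Option String)) :=
  if seg.1 ≠ "" && !seg.2.isEmpty then
    some (pvMkQuery (some seg.1) (PySem.Str.strip (PySem.Str.join "\n" seg.2)))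
  else none

def parse_multi_database_sql_alt (llm_output : String) : List (List (String × Option String)) :=
  let queries := (pvSegments llm_output).filterMap pvSegOut
  if queries.isEmpty && decide (PySem.Str.strip llm_output ≠ "") then
    [[("database_name", none), ("sql", some (PySem.Str.strip llm_output))]]
  else queries

-- ===== PRECONDITION & SPEC =====
def Spec_parse_multi_database_sql (llm_output : String) (out : List (List (String × Option String))) : Prop := out = parse_multi_database_sql_alt llm_output
instance (llm_output : String) (out : List (List (String × Option String))) : Decidable (Spec_parse_multi_database_sql llm_output out) := by unfold Spec_parse_multi_database_sql; infer_instance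

-- ===== CLAIM (what is proved, stated in full; the proofs are below) =====
def Claim_equal_parse_multi_database_sql : Prop := ∀ (llm_output : String), Dom_parse_multi_database_sql llm_output → Spec_parse_multi_database_sql llm_output (parse_multi_database_sql llm_output)

-- ===== LEMMAS AND PROOFS =====

-- invariant tying A's loop state to B's segment list after the same prefix of lines
def pvInv (st : List (List (String × Option String)) × Option String × List String)
    (segs : List (String × List String)) : Prop :=
  (st.2.1 = none → segs = [] ∧ st.1 = [] ∧ st.2.2 = []) ∧
  (∀ d, st.2.1 = some d → ∃ pre lsB, segs = pre ++ [(d, lsB)] ∧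
      st.1 = pre.filterMap pvSegOut ∧ (if d = "" then st.2.2 = [] else st.2.2 = lsB))

-- evaluation lemmas for the two step functions, one per branch
theorem pvAStep_marker (qs : List (List (String × Option String))) (db : Option String)
    (ls : List String) (raw : String)
    (hm : PySem.Str.startswith (PySem.Str.upper (PySem.Str.strip raw)) "DATABASE:" = true) :
    pvAStep (qs, db, ls) raw =
      (if pvTruthyDb db && !ls.isEmpty then
        (qs ++ [pvMkQuery db (PySem.Str.strip (PySem.Str.join "\n" ls))],
         some (pvMarkerName (PySem.Str.strip raw)), [])
      else (qs, some (pvMarkerName (PySem.Str.strip raw)), ls)) := by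
  simp only [pvAStep]; rw [if_pos hm]

theorem pvAStep_line (qs : List (List (String × Option String))) (db : Option String)
    (ls : List String) (raw : String)
    (hm : ¬ PySem.Str.startswith (PySem.Str.upper (PySem.Str.strip raw)) "DATABASE:" = true)
    (hl : (decide (PySem.Str.strip raw ≠ "") && pvTruthyDb db) = true) :
    pvAStep (qs, db, ls) raw = (qs, db, ls ++ [PySem.Str.strip raw]) := by
  simp only [pvAStep]; rw [if_neg hm, if_pos hl]

theorem pvAStep_skip (qs : List (List (String × Option String))) (db : Option String)
    (ls : List String) (raw : String)
    (hm : ¬ PySem.Str.startswith (PySem.Str.upper (PySem.Str.strip raw)) "DATABASE:" = true)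
    (hl : ¬ (decide (PySem.Str.strip raw ≠ "") && pvTruthyDb db) = true) :
    pvAStep (qs, db, ls) raw = (qs, db, ls) := by
  simp only [pvAStep]; rw [if_neg hm, if_neg hl]

theorem pvBStep_marker (segs : List (String × List String)) (raw : String)
    (hm : PySem.Str.startswith (PySem.Str.upper (PySem.Str.strip raw)) "DATABASE:" = true) :
    pvBStep segs raw = segs ++ [(pvMarkerName (PySem.Str.strip raw), [])] := by
  simp only [pvBStep]; rw [if_pos hm]

theorem pvBStep_line (segs : List (String × List String)) (raw : String)
    (hm : ¬ PySem.Str.startswith (PySem.Str.upper (PySem.Str.strip raw)) "DATABASE:" = true)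
    (hl : (decide (PySem.Str.strip raw ≠ "") && !segs.isEmpty) = true) :
    pvBStep segs raw = segs.dropLast ++
      [((segs.getLast?.getD ("", [])).1, (segs.getLast?.getD ("", [])).2 ++ [PySem.Str.strip raw])] := by
  simp only [pvBStep]; rw [if_neg hm, if_pos hl]

theorem pvBStep_skip (segs : List (String × List String)) (raw : String)
    (hm : ¬ PySem.Str.startswith (PySem.Str.upper (PySem.Str.strip raw)) "DATABASE:" = true)
    (hl : ¬ (decide (PySem.Str.strip raw ≠ "") && !segs.isEmpty) = true) :
    pvBStep segs raw = segs := by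
  simp only [pvBStep]; rw [if_neg hm, if_neg hl]

theorem pvInv_step (qs : List (List (String × Option String))) (db : Option String)
    (ls : List String) (segs : List (String × List String)) (raw : String)
    (h : pvInv (qs, db, ls) segs) : pvInv (pvAStep (qs, db, ls) raw) (pvBStep segs raw) := by
  obtain ⟨hnone, hsome⟩ := h
  by_cases hm : PySem.Str.startswith (PySem.Str.upper (PySem.Str.strip raw)) "DATABASE:" = true
  · rw [pvAStep_marker qs db ls raw hm, pvBStep_marker segs raw hm]
    generalize pvMarkerName (PySem.Str.strip raw) = m
    cases db with
    | none =>
      obtain ⟨h1, h2, h3⟩ := hnone rfl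
      subst h1 h2 h3
      rw [if_neg (by simp [pvTruthyDb])]
      refine ⟨by simp, fun d hd => ?_⟩
      simp only [Option.some.injEq] at hd
      subst hd
      exact ⟨[], [], rfl, rfl, by split <;> rfl⟩
    | some d =>
      obtain ⟨pre, lsB, hseg, hqs, hls⟩ := hsome d rfl
      subst hseg hqs
      by_cases hflush : (pvTruthyDb (some d) && !ls.isEmpty) = true
      · rw [if_pos hflush]
        refine ⟨by simp, fun d' hd' => ?_⟩
        simp only [Option.some.injEq] at hd'
        subst hd'
        refine ⟨pre ++ [(d, lsB)], [], rfl, ?_, by split <;> rfl⟩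
        have hd : d ≠ "" := fun hd0 => by simp [pvTruthyDb, hd0] at hflush
        rw [if_neg hd] at hls
        subst hls
        have hlsne : ls ≠ [] := fun h0 => by simp [h0] at hflush
        rw [List.filterMap_append]
        simp [pvSegOut, hd, hlsne, pvMkQuery]
      · rw [if_neg hflush]
        have hls0 : ls = [] := by
          by_cases hd : d = ""
          · rw [if_pos hd] at hls; exact hls
          · rw [if_neg hd] at hls
            by_contra hne
            exact hflush (by simp [pvTruthyDb, hd, List.isEmpty_eq_false_iff, hne])
        refine ⟨by simp, fun d' hd' => ?_⟩
        simp only [Option.some.injEq] at hd'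
        subst hd'
        refine ⟨pre ++ [(d, lsB)], [], rfl, ?_, by split <;> simp [hls0]⟩
        rw [List.filterMap_append]
        by_cases hd : d = ""
        · simp [pvSegOut, hd]
        · rw [if_neg hd] at hls
          have hlsB : lsB = [] := hls.symm.trans hls0
          simp [pvSegOut, hd, hlsB]
  · by_cases hline : PySem.Str.strip raw = ""
    · rw [pvAStep_skip qs db ls raw hm (by simp [hline]),
          pvBStep_skip segs raw hm (by simp [hline])]
      exact ⟨hnone, hsome⟩
    · cases db with
      | none =>
        obtain ⟨h1, h2, h3⟩ := hnone rfl
        subst h1 h2 h3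
        rw [pvAStep_skip _ _ _ raw hm (by simp [pvTruthyDb]),
            pvBStep_skip [] raw hm (by simp)]
        exact ⟨hnone, hsome⟩
      | some d =>
        obtain ⟨pre, lsB, hseg, hqs, hls⟩ := hsome d rfl
        subst hseg hqs
        by_cases hd : d = ""
        · rw [if_pos hd] at hls
          subst hls
          rw [pvAStep_skip _ _ _ raw hm (by simp [pvTruthyDb, hd]),
              pvBStep_line _ raw hm (by simp [hline])]
          generalize PySem.Str.strip raw = line
          refine ⟨by simp, fun d' hd' => ?_⟩
          simp only [Option.some.injEq] at hd'
          subst hd'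
          refine ⟨pre, lsB ++ [line], ?_, rfl, by simp [hd]⟩
          rw [List.getLast?_concat, List.dropLast_concat]
          simp
        · rw [if_neg hd] at hls
          subst hls
          rw [pvAStep_line _ _ _ raw hm (by simp [hline, pvTruthyDb, hd]),
              pvBStep_line _ raw hm (by simp [hline])]
          generalize PySem.Str.strip raw = line
          refine ⟨by simp, fun d' hd' => ?_⟩
          simp only [Option.some.injEq] at hd'
          subst hd'
          refine ⟨pre, ls ++ [line], ?_, rfl, by simp [hd]⟩
          rw [List.getLast?_concat, List.dropLast_concat]
          simp

theorem pvInv_foldl (lines : List String) :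
    pvInv (lines.foldl pvAStep ([], none, [])) (lines.foldl pvBStep []) := by
  have main : ∀ (l : List String) st segs, pvInv st segs →
      pvInv (l.foldl pvAStep st) (l.foldl pvBStep segs) := by
    intro l
    induction l with
    | nil => intro st segs h; exact h
    | cons x xs ih =>
      intro st segs h
      rw [List.foldl_cons, List.foldl_cons]
      obtain ⟨q, db, ls⟩ := st
      exact ih _ _ (pvInv_step q db ls segs x h)
  exact main lines ([], none, []) [] ⟨fun _ => ⟨rfl, rfl, rfl⟩, fun d hd => by simp at hd⟩

-- A's finish (flush + fallback) agrees with B's finish (filter + fallback) given the invariant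
theorem pvFinish (st : List (List (String × Option String)) × Option String × List String)
    (segs : List (String × List String)) (s : String) (h : pvInv st segs) :
    (let queries :=
      if pvTruthyDb st.2.1 && !st.2.2.isEmpty then
        st.1 ++ [pvMkQuery st.2.1 (PySem.Str.strip (PySem.Str.join "\n" st.2.2))]
      else st.1
     if queries.isEmpty && decide (PySem.Str.strip s ≠ "") then
       [[("database_name", none), ("sql", some (PySem.Str.strip s))]]
     else queries) =
    (let queries := segs.filterMap pvSegOut
     if queries.isEmpty && decide (PySem.Str.strip s ≠ "") then
       [[("database_name", none), ("sql", some (PySem.Str.strip s))]]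
     else queries) := by
  obtain ⟨hnone, hsome⟩ := h
  have hq : (if pvTruthyDb st.2.1 && !st.2.2.isEmpty then
      st.1 ++ [pvMkQuery st.2.1 (PySem.Str.strip (PySem.Str.join "\n" st.2.2))]
    else st.1) = segs.filterMap pvSegOut := by
    cases hdb : st.2.1 with
    | none =>
      obtain ⟨h1, h2, _⟩ := hnone hdb
      simp [h1, h2, pvTruthyDb]
    | some d =>
      obtain ⟨pre, lsB, hseg, hqs, hls⟩ := hsome d hdb
      rw [hseg, List.filterMap_append, hqs]
      by_cases hd : d = ""
      · rw [if_pos hd] at hls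
        simp [pvTruthyDb, hd, hls, pvSegOut]
      · rw [if_neg hd] at hls
        by_cases hl : st.2.2 = []
        · rw [hls] at hl
          simp [pvTruthyDb, hd, hls, hl, pvSegOut]
        · rw [hls] at hl ⊢
          simp [pvTruthyDb, hd, hl, pvSegOut, pvMkQuery]
  simp only [hq]

-- ===== VERDICT (by name: the statement is the Claim_ definition above) =====
theorem parse_multi_database_sql_spec : Claim_equal_parse_multi_database_sql := by
  intro llm_output _
  unfold Spec_parse_multi_database_sql
  exact pvFinish _ _ llm_output (pvInv_foldl ((PySem.Str.split? llm_output "\n").getD []))
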